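-- pv_equiv track=rewrite | github.com/AEjonanonymous/PMRC-IP-Core | model/pmrc_golden_model.py | get_tree_lut
-- ===== SOURCE A (Python) =====
-- def get_tree_lut(moduli):
--     """
--     Recursively calculates the modular inverses required for a parallel
--     binary tree merge. Matches the LUT_BASE logic in pmrc_core_top.sv.
--     """
--     k = len(moduli)
--     if k <= 1:
--         return [], moduli[0]
--
--     mid = k // 2
--     left_lut, M_left = get_tree_lut(moduli[:mid])
--     right_lut, M_right = get_tree_lut(moduli[mid:])
--
--     current_inv = pow(int(M_left), -1, int(M_right))
--     return left_lut + right_lut + [current_inv], M_left * M_right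
-- ===== SOURCE B (Python) =====
-- def get_tree_lut(moduli):
--     """Iterative post-order traversal over (lo, hi) index ranges instead of
--     recursion on list slices; an explicit task stack with an 'emit' marker
--     records each node's inverse after both child products are on the value stack."""
--     lut = []
--     vals = []
--     stack = [("visit", 0, len(moduli))]
--     while stack:
--         op, lo, hi = stack.pop()
--         if op == "visit":
--             if hi - lo <= 1:
--                 vals.append(moduli[lo])
--             else:
--                 mid = lo + (hi - lo) // 2
--                 stack.append(("emit", 0, 0))
--                 stack.append(("visit", mid, hi))
--                 stack.append(("visit", lo, mid))
--         else:
--             m_right = vals.pop()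
--             m_left = vals.pop()
--             lut.append(pow(int(m_left), -1, int(m_right)))
--             vals.append(m_left * m_right)
--     return lut, vals[-1]
-- ===== Notes on version B (the rewrite author's own statement) =====
-- stated objective: alternative
-- what changed: Replaces the slice-based recursion by an explicit iterative post-order traversal: a task stack of (lo,hi) index ranges with an 'emit' marker and a value stack of partial products, appending each node's modular inverse once both child products are available; no list slices are created.
import Mathlib
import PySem

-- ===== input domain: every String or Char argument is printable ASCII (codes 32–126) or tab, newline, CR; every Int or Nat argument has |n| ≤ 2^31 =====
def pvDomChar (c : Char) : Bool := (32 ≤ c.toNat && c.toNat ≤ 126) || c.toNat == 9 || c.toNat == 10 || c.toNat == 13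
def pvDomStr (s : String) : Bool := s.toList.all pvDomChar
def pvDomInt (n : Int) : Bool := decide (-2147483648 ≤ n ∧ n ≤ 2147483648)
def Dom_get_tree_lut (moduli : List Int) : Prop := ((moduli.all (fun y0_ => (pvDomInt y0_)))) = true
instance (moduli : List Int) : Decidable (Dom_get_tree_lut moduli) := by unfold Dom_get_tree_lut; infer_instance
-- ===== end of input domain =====

-- B re-implements the recursion as an explicit iterative post-order traversal over index
-- ranges (task stack + value stack); equivalence of the return values is proved on Pre_.

-- ===== PORT A =====
-- shared helper: Python's built-in pow(a, -1, m) (ported via the extended Euclid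
-- coefficient Nat.gcdA; exact wherever Python returns, i.e. m ≠ 0 and gcd(a, m) = 1;
-- returns 0 where Python raises — those inputs are outside Pre_)
def pymodinv (a m : Int) : Int :=
  if m = 0 then 0
  else
    let mm := m.natAbs
    let a' := (a % (mm : Int)).toNat
    if Nat.gcd a' mm = 1 then PySem.Int.mod (Nat.gcdA a' mm) m else 0

def get_tree_lut (moduli : List Int) : List Int × Int :=
  -- k = len(moduli); if k <= 1: return [], moduli[0]   (moduli[0] on [] raises: outside Pre_)
  if _h : moduli.length ≤ 1 then ([], (PySem.List.pyGet? moduli 0).getD 0)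
  else
    let mid := moduli.length / 2
    let L := get_tree_lut (PySem.List.slice moduli none (some (mid : Int)))    -- moduli[:mid]
    let R := get_tree_lut (PySem.List.slice moduli (some (mid : Int)) none)    -- moduli[mid:]
    (L.1 ++ R.1 ++ [pymodinv L.2 R.2], L.2 * R.2)
termination_by moduli.length
decreasing_by
  · simp only [PySem.List.slice_to_natCast, List.length_take]; omega
  · simp only [PySem.List.slice_from_natCast, List.length_drop]; omega

-- ===== PORT B =====
inductive PVTask where
  | visit (lo hi : Nat)
  | emit
deriving DecidableEq, Repr

-- One step per Python loop iteration.  Lean stacks keep the TOP at the HEAD (Python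
-- appends/pops at the end of its lists): append = cons, pop = match on head.
-- The fuel argument only makes the while-loop total; it is never exhausted when
-- started with pvFuel (proved below) and on exhaustion the current state is returned.
def pvRunB (moduli : List Int) : Nat → List PVTask → List Int → List Int → List Int × List Int
  | 0, _, lut, vals => (lut, vals)
  | _ + 1, [], lut, vals => (lut, vals)
  | fuel + 1, PVTask.visit lo hi :: st, lut, vals =>
      if hi - lo ≤ 1 then
        -- vals.append(moduli[lo])   (raises on []: outside Pre_)
        pvRunB moduli fuel st lut ((PySem.List.pyGet? moduli (lo : Int)).getD 0 :: vals)
      else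
        let mid := lo + (hi - lo) / 2
        pvRunB moduli fuel (PVTask.visit lo mid :: PVTask.visit mid hi :: PVTask.emit :: st) lut vals
  | fuel + 1, PVTask.emit :: st, lut, vals =>
      match vals with
      | m_right :: m_left :: rest =>
          pvRunB moduli fuel st (lut ++ [pymodinv m_left m_right]) (m_left * m_right :: rest)
      | _ => (lut, vals)   -- Python's vals.pop() would raise; unreachable from the initial state

-- number of loop iterations the traversal of the range [lo, hi) takes (totality fuel)
def pvFuel (lo hi : Nat) : Nat :=
  if hi - lo ≤ 1 then 1
  else pvFuel lo (lo + (hi - lo) / 2) + pvFuel (lo + (hi - lo) / 2) hi + 2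
termination_by hi - lo
decreasing_by all_goals omega

def get_tree_lut_alt (moduli : List Int) : List Int × Int :=
  ((pvRunB moduli (pvFuel 0 moduli.length) [PVTask.visit 0 moduli.length] [] []).1,
   (PySem.List.pyGet?
      (pvRunB moduli (pvFuel 0 moduli.length) [PVTask.visit 0 moduli.length] [] []).2
      (-1)).getD 0)   -- vals[-1] = head of the Lean stack

-- ===== PRECONDITION & SPEC =====
-- Pre_: the natural CRT domain = exactly the inputs where Python A returns: a nonempty
-- list, pairwise coprime, with no zero after the head (a zero anywhere but index 0
-- reaches a pow(·, -1, 0) ValueError; a non-coprime pair makes some pow raise ValueError;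
-- the empty list raises IndexError).
def Pre_get_tree_lut (moduli : List Int) : Prop :=
  moduli ≠ [] ∧ moduli.tail.all (· ≠ 0) = true ∧
    moduli.Pairwise (fun a b => Int.gcd a b = 1)
instance (moduli : List Int) : Decidable (Pre_get_tree_lut moduli) := by
  unfold Pre_get_tree_lut; infer_instance

def pvWitness_get_tree_lut : List Int := [3, 5, 7, 4]

def Spec_get_tree_lut (moduli : List Int) (out : List Int × Int) : Prop := out = get_tree_lut_alt moduli
instance (moduli : List Int) (out : List Int × Int) : Decidable (Spec_get_tree_lut moduli out) := by unfold Spec_get_tree_lut; infer_instance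

-- ===== CLAIM (what is proved, stated in full; the proofs are below) =====
def Claim_equal_get_tree_lut : Prop := ∀ (moduli : List Int), Dom_get_tree_lut moduli → Pre_get_tree_lut moduli → Spec_get_tree_lut moduli (get_tree_lut moduli)

-- ===== LEMMAS AND PROOFS =====

-- running the machine on 'visit lo hi' with enough fuel performs exactly the recursion's
-- work on the segment moduli[lo:hi]: it appends that segment's lut and pushes its product
lemma pvRunB_visit (moduli : List Int) :
    ∀ s lo hi, hi - lo = s → lo < hi → hi ≤ moduli.length →
    ∀ fuel st lut vals,
      pvRunB moduli (fuel + pvFuel lo hi) (PVTask.visit lo hi :: st) lut vals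
        = pvRunB moduli fuel st
            (lut ++ (get_tree_lut ((moduli.drop lo).take (hi - lo))).1)
            ((get_tree_lut ((moduli.drop lo).take (hi - lo))).2 :: vals) := by
  intro s
  induction s using Nat.strong_induction_on with
  | _ s ih =>
    intro lo hi hs hlt hle fuel st lut vals
    by_cases hbase : hi - lo ≤ 1
    · -- size-1 segment
      have hsz : hi - lo = 1 := by omega
      have hseg : (moduli.drop lo).take (hi - lo) = [moduli[lo]] := by
        rw [hsz]
        have hlo : lo < moduli.length := by omega
        rw [List.take_one, List.head?_drop]
        simp [List.getElem?_eq_getElem hlo]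
      rw [pvFuel]
      simp only [hbase, if_true]
      rw [pvRunB]
      simp only [hbase, if_true]
      rw [hseg, get_tree_lut]
      have hlo : lo < moduli.length := by omega
      simp [PySem.List.pyGet?_natCast, List.getElem?_eq_getElem hlo]
    · -- internal node
      have h2 : 2 ≤ hi - lo := by omega
      set mid := lo + (hi - lo) / 2 with hmid
      have hm1 : lo < mid := by omega
      have hm2 : mid < hi := by omega
      rw [pvFuel]
      simp only [hbase, if_false, ← hmid]
      have hstep :
          pvRunB moduli (fuel + (pvFuel lo mid + pvFuel mid hi + 2))
              (PVTask.visit lo hi :: st) lut vals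
            = pvRunB moduli (fuel + 1 + pvFuel mid hi + pvFuel lo mid)
                (PVTask.visit lo mid :: PVTask.visit mid hi :: PVTask.emit :: st) lut vals := by
        have : fuel + (pvFuel lo mid + pvFuel mid hi + 2)
            = (fuel + 1 + pvFuel mid hi + pvFuel lo mid) + 1 := by omega
        rw [this, pvRunB]
        simp only [hbase, if_false, ← hmid]
      rw [hstep]
      rw [ih (mid - lo) (by omega) lo mid rfl hm1 (by omega)]
      rw [ih (hi - mid) (by omega) mid hi rfl hm2 hle]
      rw [pvRunB]
      -- identify the segments
      have hL : ((moduli.drop lo).take (hi - lo)).take ((hi - lo) / 2)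
          = (moduli.drop lo).take (mid - lo) := by
        rw [List.take_take]; congr 1; omega
      have hR : ((moduli.drop lo).take (hi - lo)).drop ((hi - lo) / 2)
          = (moduli.drop mid).take (hi - mid) := by
        rw [List.drop_take, List.drop_drop]
        congr 1; omega
      have hlen : ((moduli.drop lo).take (hi - lo)).length = hi - lo := by
        simp; omega
      conv_rhs => rw [get_tree_lut]
      have hnot : ¬ ((moduli.drop lo).take (hi - lo)).length ≤ 1 := by rw [hlen]; omega
      simp only [hnot, dif_neg, not_false_iff]
      rw [hlen]
      rw [PySem.List.slice_to_natCast, PySem.List.slice_from_natCast, hL, hR]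
      simp [List.append_assoc]

lemma get_tree_lut_alt_eq (moduli : List Int) (h : moduli ≠ []) :
    get_tree_lut_alt moduli = get_tree_lut moduli := by
  have hlen : 0 < moduli.length := List.length_pos_iff.mpr h
  unfold get_tree_lut_alt
  have := pvRunB_visit moduli moduli.length 0 moduli.length (by omega) hlen le_rfl
      0 [] [] []
  simp only [Nat.zero_add] at this
  rw [this]
  simp [pvRunB, PySem.List.pyGet?_neg_one]

-- ===== VERDICT (by name: the statement is the Claim_ definition above) =====
theorem get_tree_lut_spec : Claim_equal_get_tree_lut := by
  intro moduli _ hpre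
  unfold Spec_get_tree_lut
  exact (get_tree_lut_alt_eq moduli hpre.1).symm
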